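-- pv_equiv track=rewrite | github.com/opensourceclaw/claw-rl | src/claw_rl/hooks/pre_session.py | _build_memory
-- ===== SOURCE A (Python) =====
-- from typing import List, Optional
--
-- def _build_memory(hints: List[str], patterns: List[str]) -> str:
--     """
--     Build memory section for injection
--
--     Args:
--         hints: List of hints
--         patterns: List of patterns
--
--     Returns:
--         str: Formatted memory section
--     """
--     sections = []
--
--     if hints:
--         sections.append("## 🧠 Learned Hints (claw-rl)\n")
--         sections.append("Recent learning signals from user feedback:\n\n")
--         for i, hint in enumerate(hints, 1):
--             sections.append(f"{i}. {hint}\n")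
--
--     if patterns:
--         if sections:
--             sections.append("\n")
--         sections.append("## 📊 Learned Patterns (claw-rl)\n")
--         sections.append("Patterns discovered from past decisions:\n\n")
--         for i, pattern in enumerate(patterns, 1):
--             sections.append(f"{i}. {pattern}\n")
--
--     return "".join(sections) if sections else ""
-- ===== SOURCE B (Python) =====
-- from typing import List, Tuple
--
--
-- def _lines(items: List[str], i: int) -> str:
--     out = ""
--     k = i
--     for item in items:
--         out += str(k) + ". " + item + "\n"
--         k += 1
--     return out
--
--
-- def _render(secs: List[Tuple[str, str, List[str]]]) -> str:
--     if not secs: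
--         return ""
--     title, intro, items = secs[0]
--     tail = _render(secs[1:])
--     return title + intro + _lines(items, 1) + ("\n" + tail if tail else tail)
--
--
-- def _build_memory(hints: List[str], patterns: List[str]) -> str:
--     table = [
--         ("## 🧠 Learned Hints (claw-rl)\n",
--          "Recent learning signals from user feedback:\n\n", hints),
--         ("## 📊 Learned Patterns (claw-rl)\n",
--          "Patterns discovered from past decisions:\n\n", patterns),
--     ]
--     return _render([sec for sec in table if sec[2]])
-- ===== Notes on version B (the rewrite author's own statement) =====
-- stated objective: alternative
-- what changed: A's flat fragment list with an explicit conditional separator and a final join is replaced by a data-driven design: a table of (title, intro, items) section descriptors is filtered for nonempty item lists and rendered by a recursive section renderer that prepends the separator only to a nonempty tail, with numbered lines built by direct string accumulation with an explicit counter instead of enumerate+join.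
import Mathlib
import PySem

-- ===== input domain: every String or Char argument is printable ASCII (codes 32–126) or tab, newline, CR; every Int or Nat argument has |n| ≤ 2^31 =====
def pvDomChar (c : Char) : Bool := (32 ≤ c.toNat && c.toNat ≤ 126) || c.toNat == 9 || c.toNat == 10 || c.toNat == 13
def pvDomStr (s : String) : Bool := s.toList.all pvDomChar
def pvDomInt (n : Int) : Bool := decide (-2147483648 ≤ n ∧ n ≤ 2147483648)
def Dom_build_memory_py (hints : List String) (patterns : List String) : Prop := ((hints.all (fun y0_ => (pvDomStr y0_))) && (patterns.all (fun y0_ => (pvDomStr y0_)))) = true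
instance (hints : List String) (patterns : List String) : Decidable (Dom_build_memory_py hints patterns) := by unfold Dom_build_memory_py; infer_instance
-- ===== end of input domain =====

-- B replaces A's imperative append list and explicit separator flag by a data-driven table of
-- section descriptors filtered for nonempty item lists and rendered by structural recursion
-- (objective: alternative decomposition, same cost).

-- ===== PORT A =====
-- f"{i}. {item}\n"
def pyFmtItem (p : Int × String) : String := PySem.Int.toStr p.1 ++ ". " ++ p.2 ++ "\n"

def build_memory_py (hints : List String) (patterns : List String) : String :=
  let sections : List String := []
  let sections :=
    if hints.isEmpty then sections
    else
      (PySem.List.enumerate hints 1).foldl (fun acc p => acc ++ [pyFmtItem p])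
        (sections ++ ["## 🧠 Learned Hints (claw-rl)\n", "Recent learning signals from user feedback:\n\n"])
  let sections :=
    if patterns.isEmpty then sections
    else
      let sections := if sections.isEmpty then sections else sections ++ ["\n"]
      (PySem.List.enumerate patterns 1).foldl (fun acc p => acc ++ [pyFmtItem p])
        (sections ++ ["## 📊 Learned Patterns (claw-rl)\n", "Patterns discovered from past decisions:\n\n"])
  if sections.isEmpty then "" else PySem.Str.join "" sections

-- ===== PORT B =====
-- numbered-line renderer: string accumulator + explicit line counter k
def pvLines (items : List String) (i : Int) : String :=
  (items.foldl (fun (st : String × Int) item => (st.1 ++ (PySem.Int.toStr st.2 ++ ". " ++ item ++ "\n"), st.2 + 1)) ("", i)).1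

-- recursive section renderer; prepends the "\n" separator only to a nonempty tail
def pvRender : List (String × String × List String) → String
  | [] => ""
  | (title, intro, items) :: rest =>
    let tail := pvRender rest
    title ++ intro ++ pvLines items 1 ++ (if tail = "" then tail else "\n" ++ tail)

def build_memory_py_alt (hints : List String) (patterns : List String) : String :=
  let table : List (String × String × List String) :=
    [("## 🧠 Learned Hints (claw-rl)\n", "Recent learning signals from user feedback:\n\n", hints),
     ("## 📊 Learned Patterns (claw-rl)\n", "Patterns discovered from past decisions:\n\n", patterns)]
  pvRender (table.filter (fun sec => !sec.2.2.isEmpty))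

-- ===== PRECONDITION & SPEC =====
def Spec_build_memory_py (hints : List String) (patterns : List String) (out : String) : Prop := out = build_memory_py_alt hints patterns
instance (hints : List String) (patterns : List String) (out : String) : Decidable (Spec_build_memory_py hints patterns out) := by unfold Spec_build_memory_py; infer_instance

-- ===== CLAIM =====
def Claim_equal_build_memory_py : Prop := ∀ (hints : List String) (patterns : List String), Dom_build_memory_py hints patterns → Spec_build_memory_py hints patterns (build_memory_py hints patterns)

-- ===== LEMMAS AND PROOFS =====

theorem pvJoinEmpty_cons (a : String) (l : List String) :
    PySem.Str.join "" (a :: l) = a ++ PySem.Str.join "" l := by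
  apply String.toList_inj.mp
  cases l <;> simp [PySem.Str.toList_join, PySem.Chars.join, List.intercalate]

theorem pvJoinEmpty_append (l1 l2 : List String) :
    PySem.Str.join "" (l1 ++ l2) = PySem.Str.join "" l1 ++ PySem.Str.join "" l2 := by
  induction l1 with
  | nil =>
    apply String.toList_inj.mp
    simp [PySem.Str.toList_join]
  | cons a l ih =>
    rw [List.cons_append, pvJoinEmpty_cons, pvJoinEmpty_cons, ih, String.append_assoc]

theorem pvFlatten_map {α β : Type} (f : α → β) (l : List α) :
    (l.map (fun x => [f x])).flatten = l.map f := by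
  induction l <;> simp_all

-- B's line recursion computes exactly A's joined enumerate-formatted items
theorem pvLines_fold (items : List String) (i : Int) (acc : String) :
    (items.foldl (fun (st : String × Int) item => (st.1 ++ (PySem.Int.toStr st.2 ++ ". " ++ item ++ "\n"), st.2 + 1)) (acc, i)).1
      = acc ++ PySem.Str.join "" ((PySem.List.enumerate items i).map pyFmtItem) := by
  induction items generalizing i acc with
  | nil => simp [PySem.Str.join]
  | cons x rest ih =>
    rw [PySem.List.enumerate_cons, List.foldl_cons, ih]
    simp only [List.map_cons, pvJoinEmpty_cons, pyFmtItem, String.append_assoc]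

theorem pvLines_eq (items : List String) (i : Int) :
    pvLines items i = PySem.Str.join "" ((PySem.List.enumerate items i).map pyFmtItem) := by
  have := pvLines_fold items i ""
  simpa [pvLines] using this

theorem build_memory_py_spec : Claim_equal_build_memory_py := by
  intro hints patterns _
  unfold Spec_build_memory_py build_memory_py build_memory_py_alt
  by_cases h1 : hints.isEmpty <;> by_cases h2 : patterns.isEmpty <;>
    simp [h1, h2, List.filter, pvRender, pvLines_eq, pvJoinEmpty_append, pvJoinEmpty_cons,
          pvFlatten_map, ← String.append_assoc]
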